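-- pv_equiv track=rewrite | github.com/HarouneKESSAL/tajweed-modular-assessment | scripts/content/mine_chunked_content_hardcases.py | collapse_excess_repetitions
-- ===== SOURCE A (Python) =====
-- def collapse_excess_repetitions(text: str, max_run: int = 2) -> str:
--     if not text:
--         return text
--     out = [text[0]]
--     run_char = text[0]
--     run_len = 1
--     for ch in text[1:]:
--         if ch == run_char:
--             run_len += 1
--             if run_len <= max_run:
--                 out.append(ch)
--         else:
--             run_char = ch
--             run_len = 1
--             out.append(ch)
--     return "".join(out)
-- ===== SOURCE B (Python) =====
-- def collapse_excess_repetitions(text: str, max_run: int = 2) -> str: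
--     out = []
--     i = 0
--     n = len(text)
--     while i < n:
--         j = i
--         while j < n and text[j] == text[i]:
--             j += 1
--         out.append(text[i] * max(1, min(j - i, max_run)))
--         i = j
--     return "".join(out)
-- ===== Notes on version B (the rewrite author's own statement) =====
-- stated objective: alternative
-- what changed: Replaces A's character-by-character run-length state machine with a two-pointer run scanner: an inner loop finds each maximal run of equal characters, and the output is built per run as ch * max(1, min(run_length, max_run)).
import Mathlib
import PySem

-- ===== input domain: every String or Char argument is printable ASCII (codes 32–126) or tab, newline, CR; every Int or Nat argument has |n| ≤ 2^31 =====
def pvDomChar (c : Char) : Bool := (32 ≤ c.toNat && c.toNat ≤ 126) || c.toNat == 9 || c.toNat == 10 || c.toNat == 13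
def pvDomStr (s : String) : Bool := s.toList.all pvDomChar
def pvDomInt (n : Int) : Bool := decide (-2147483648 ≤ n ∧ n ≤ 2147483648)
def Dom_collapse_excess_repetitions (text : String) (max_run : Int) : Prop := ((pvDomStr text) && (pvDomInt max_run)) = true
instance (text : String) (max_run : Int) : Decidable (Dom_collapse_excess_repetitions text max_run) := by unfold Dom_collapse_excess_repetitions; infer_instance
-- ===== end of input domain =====

-- B replaces A's per-character run-length state machine with a two-pointer run scanner
-- (find each maximal run, emit max(1, min(len, max_run)) copies); same cost, different decomposition.


-- ===== PORT A =====
-- the body of A's for-loop, as a fold step over the state (out, run_char, run_len)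
def pvStepA (max_run : Int) (s : List Char × Char × Int) (ch : Char) : List Char × Char × Int :=
  if ch == s.2.1 then
    let rl := s.2.2 + 1
    (if rl ≤ max_run then s.1 ++ [ch] else s.1, s.2.1, rl)
  else
    (s.1 ++ [ch], ch, 1)

def collapse_excess_repetitions (text : String) (max_run : Int) : String :=
  match text.toList with
  | [] => text
  | c :: rest =>   -- text[0] = c, text[1:] = rest
    String.ofList ((rest.foldl (pvStepA max_run) ([c], c, 1)).1)

-- ===== PORT B =====
-- B's inner while loop (advance j over the run of text[i]) is ported exactly as
-- takeWhile/dropWhile on the remaining characters; the outer while is this recursion.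
def pvRuns (l : List Char) : List (Char × Nat) :=
  match l with
  | [] => []
  | c :: rest =>
    (c, (rest.takeWhile (· == c)).length + 1) :: pvRuns (rest.dropWhile (· == c))
termination_by l.length
decreasing_by
  simp only [List.length_cons]
  exact Nat.lt_succ_of_le (List.length_dropWhile_le _ _)

-- ch * max(1, min(run_len, max_run))
def pvRep (max_run : Int) (p : Char × Nat) : List Char :=
  List.replicate (max 1 (min (p.2 : Int) max_run)).toNat p.1

def collapse_excess_repetitions_alt (text : String) (max_run : Int) : String :=
  String.ofList ((pvRuns text.toList).flatMap (pvRep max_run))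

-- ===== PRECONDITION & SPEC =====
def Spec_collapse_excess_repetitions (text : String) (max_run : Int) (out : String) : Prop := out = collapse_excess_repetitions_alt text max_run
instance (text : String) (max_run : Int) (out : String) : Decidable (Spec_collapse_excess_repetitions text max_run out) := by unfold Spec_collapse_excess_repetitions; infer_instance

-- ===== CLAIM (what is proved, stated in full; the proofs are below) =====
def Claim_equal_collapse_excess_repetitions : Prop := ∀ (text : String) (max_run : Int), Dom_collapse_excess_repetitions text max_run → Spec_collapse_excess_repetitions text max_run (collapse_excess_repetitions text max_run)

-- ===== LEMMAS AND PROOFS =====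

-- the head of a nonempty dropWhile fails the predicate
theorem pv_dropWhile_head_false {p : Char → Bool} :
    ∀ (l : List Char) (d : Char) (t : List Char), l.dropWhile p = d :: t → p d = false := by
  intro l
  induction l with
  | nil => intro d t h; simp [List.dropWhile] at h
  | cons x xs ih =>
    intro d t h
    by_cases hp : p x
    · rw [List.dropWhile_cons_of_pos hp] at h; exact ih d t h
    · rw [List.dropWhile_cons_of_neg hp] at h
      cases h; simpa using hp

-- A's fold across a block of characters all equal to the current run char
theorem pv_fold_run (max_run : Int) (c : Char) :
    ∀ (same : List Char), (∀ x ∈ same, x = c) → ∀ (out : List Char) (k : Int),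
      same.foldl (pvStepA max_run) (out, c, k) =
        (out ++ List.replicate (min (k + same.length) max_run - min k max_run).toNat c,
          c, k + same.length) := by
  intro same
  induction same with
  | nil => intro _ out k; simp
  | cons x s ih =>
    intro hall out k
    have hx : x = c := hall x (by simp)
    subst hx
    simp only [List.foldl_cons, pvStepA, beq_self_eq_true, if_true]
    rw [ih (fun y hy => hall y (by simp [hy])) _ (k + 1)]
    refine Prod.ext ?_ (Prod.ext rfl ?_)
    · by_cases hle : k + 1 ≤ max_run
      · rw [if_pos hle, List.append_assoc, List.singleton_append, ← List.replicate_succ]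
        have hcnt : (min (k + 1 + (s.length : Int)) max_run - min (k + 1) max_run).toNat + 1
            = (min (k + ((x :: s).length : Int)) max_run - min k max_run).toNat := by
          simp only [List.length_cons]; push_cast; omega
        rw [hcnt]
      · rw [if_neg hle]
        have hcnt : (min (k + 1 + (s.length : Int)) max_run - min (k + 1) max_run).toNat
            = (min (k + ((x :: s).length : Int)) max_run - min k max_run).toNat := by
          simp only [List.length_cons]; push_cast; omega
        rw [hcnt]
    · simp only [List.length_cons]
      omega

-- A's loop, started just after emitting the first character of a run, produces B's runs output
theorem pv_main (max_run : Int) :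
    ∀ (n : Nat) (l : List Char) (c : Char) (out : List Char), l.length ≤ n →
      (l.foldl (pvStepA max_run) (out ++ [c], c, 1)).1 =
        out ++ (pvRuns (c :: l)).flatMap (pvRep max_run) := by
  intro n
  induction n with
  | zero =>
    intro l c out hl
    have : l = [] := List.length_eq_zero_iff.mp (Nat.le_zero.mp hl)
    subst this
    simp [pvRuns, pvRep]
  | succ m ih =>
    intro l c out hl
    have hsplit : l.takeWhile (· == c) ++ l.dropWhile (· == c) = l :=
      List.takeWhile_append_dropWhile
    have hall : ∀ x ∈ l.takeWhile (· == c), x = c := fun x hx =>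
      eq_of_beq (List.mem_takeWhile_imp (p := (· == c)) hx)
    have hfs : List.foldl (pvStepA max_run) (out ++ [c], c, 1) l
        = List.foldl (pvStepA max_run)
            (List.foldl (pvStepA max_run) (out ++ [c], c, 1) (l.takeWhile (· == c)))
            (l.dropWhile (· == c)) := by
      conv_lhs => rw [← hsplit]
      rw [List.foldl_append]
    rw [hfs, pv_fold_run max_run c _ hall (out ++ [c]) 1, pvRuns]
    have hrep : out ++ [c] ++ List.replicate
          (min (1 + ((l.takeWhile (· == c)).length : Int)) max_run - min 1 max_run).toNat c
        = out ++ pvRep max_run (c, (l.takeWhile (· == c)).length + 1) := by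
      rw [List.append_assoc]
      congr 1
      rw [List.singleton_append, ← List.replicate_succ]
      simp only [pvRep]
      congr 1
      omega
    cases hmore : l.dropWhile (· == c) with
    | nil =>
      simp only [List.foldl_nil]
      show out ++ [c] ++ _ = _
      rw [hrep]
      simp [pvRuns]
    | cons d t =>
      have hd : (d == c) = false := pv_dropWhile_head_false l d t hmore
      have hstep : pvStepA max_run
          (out ++ [c] ++ List.replicate
            (min (1 + ((l.takeWhile (· == c)).length : Int)) max_run - min 1 max_run).toNat c, c,
            1 + ((l.takeWhile (· == c)).length : Int)) d
          = (out ++ [c] ++ List.replicate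
            (min (1 + ((l.takeWhile (· == c)).length : Int)) max_run - min 1 max_run).toNat c
            ++ [d], d, 1) := by
        simp [pvStepA, hd]
      have hlen : t.length ≤ m := by
        have h1 : (l.dropWhile (· == c)).length ≤ l.length := List.length_dropWhile_le _ _
        rw [hmore] at h1
        simp only [List.length_cons] at h1
        omega
      simp only [List.foldl_cons, hstep]
      rw [ih t d _ hlen, hrep]
      simp [List.append_assoc]

-- ===== VERDICT (by name: the statement is the Claim_ definition above) =====
theorem collapse_excess_repetitions_spec : Claim_equal_collapse_excess_repetitions := by
  intro text max_run _
  show _ = _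
  unfold collapse_excess_repetitions collapse_excess_repetitions_alt
  cases h : text.toList with
  | nil =>
    have ht : text = "" := String.toList_eq_nil_iff.mp h
    subst ht
    simp [pvRuns]
  | cons c rest =>
    exact congrArg String.ofList (by simpa using pv_main max_run rest.length rest c [] le_rfl)
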